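-- pv_equiv track=rewrite | github.com/EliFrun/my-leetcode-submissions | submissions/3948-maximum-number-of-subsequences-after-one-inserting/solution.py | numOfSubsequences
-- ===== SOURCE A (Python) =====
-- def numOfSubsequences(s: str) -> int:
--     ret = 0
--     t = s.count('T')
--     l = 0
--     la, ta = 0, 0
--     best_add = 0
--     ret = 0
--     for c in s:
--         if c == 'L':
--             l += 1
--         if c == "T":
--             t -= 1
--
--
--         best_add = max(best_add, l * t)
--         if c == "C":
--             ret += l * t
--             la += t
--             ta += l
--
--     return ret + max(best_add, la, ta)
-- ===== SOURCE B (Python) =====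
-- def numOfSubsequences(s: str) -> int:
--     # Prefix L-counts (L's strictly before each position) and suffix T-counts
--     # (T's strictly after each position), then independent index-free passes.
--     lp_list = []
--     acc = 0
--     for c in s:
--         lp_list.append(acc)
--         if c == 'L':
--             acc += 1
--     ts_rev = []
--     acc = 0
--     for c in reversed(s):
--         ts_rev.append(acc)
--         if c == 'T':
--             acc += 1
--     ts_list = list(reversed(ts_rev))
--     triples = list(zip(s, lp_list, ts_list))
--     base = sum(lp * ts for c, lp, ts in triples if c == 'C')
--     gain_c = max([0] + [(lp + (1 if c == 'L' else 0)) * ts for c, lp, ts in triples])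
--     gain_l = sum(ts for c, lp, ts in triples if c == 'C')
--     gain_t = sum(lp for c, lp, ts in triples if c == 'C')
--     return base + max(gain_c, gain_l, gain_t)
-- ===== Notes on version B (the rewrite author's own statement) =====
-- stated objective: alternative
-- what changed: A threads six running variables (decremented T-counter, running L-count, four accumulators) through one stateful loop; B first precomputes a prefix-L table and a suffix-T table, zips them with the characters, and computes the base count and the three insertion gains in separate index-free passes over the triples.
import Mathlib
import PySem

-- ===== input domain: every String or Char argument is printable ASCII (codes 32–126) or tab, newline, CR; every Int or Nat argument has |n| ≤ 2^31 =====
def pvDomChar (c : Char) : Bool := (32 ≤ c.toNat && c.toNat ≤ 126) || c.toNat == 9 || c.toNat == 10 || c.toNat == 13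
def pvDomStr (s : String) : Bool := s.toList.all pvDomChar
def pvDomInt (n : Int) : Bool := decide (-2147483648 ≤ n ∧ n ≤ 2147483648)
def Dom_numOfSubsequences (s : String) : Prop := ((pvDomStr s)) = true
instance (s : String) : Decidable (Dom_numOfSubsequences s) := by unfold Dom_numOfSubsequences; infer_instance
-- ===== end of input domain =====

-- B replaces A's single stateful loop (running L-count, decremented T-counter, four
-- accumulators) by precomputed prefix-L / suffix-T count tables and separate index-free
-- passes over (char, lp, ts) triples; objective: alternative decomposition, same O(n) cost.

-- ===== PORT A =====
-- the loop body of A's single for-loop; state = (ret, t, l, la, ta, best_add)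
def numOfSubsequencesStep (st : Int × Int × Int × Int × Int × Int) (c : Char) :
    Int × Int × Int × Int × Int × Int :=
  let ret := st.1
  let t := st.2.1
  let l := st.2.2.1
  let la := st.2.2.2.1
  let ta := st.2.2.2.2.1
  let best := st.2.2.2.2.2
  let l := if c = 'L' then l + 1 else l
  let t := if c = 'T' then t - 1 else t
  let best := max best (l * t)
  if c = 'C' then (ret + l * t, t, l, la + t, ta + l, best)
  else (ret, t, l, la, ta, best)

def numOfSubsequences (s : String) : Int :=
  let st := s.toList.foldl numOfSubsequencesStep
    (0, (PySem.Str.count s "T" : Int), 0, 0, 0, 0)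
  st.1 + max (max st.2.2.2.2.2 st.2.2.2.1) st.2.2.2.2.1

-- ===== PORT B =====
-- lp_list loop: emit current acc before each char, bump acc on 'L'
def pvLpAux : Int → List Char → List Int
  | _, [] => []
  | acc, c :: cs => acc :: pvLpAux (if c = 'L' then acc + 1 else acc) cs

-- ts_rev loop: emit current acc before each char (of the reversed string), bump on 'T'
def pvTsAux : Int → List Char → List Int
  | _, [] => []
  | acc, c :: cs => acc :: pvTsAux (if c = 'T' then acc + 1 else acc) cs

def numOfSubsequences_alt (s : String) : Int :=
  let cs := s.toList
  let lpList := pvLpAux 0 cs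
  let tsList := (pvTsAux 0 cs.reverse).reverse
  let triples := (cs.zip lpList).zip tsList
  let base := (triples.filter (fun p => p.1.1 = 'C')).foldl (fun a p => a + p.1.2 * p.2) 0
  let gainC := (triples.map (fun p => (p.1.2 + (if p.1.1 = 'L' then 1 else 0)) * p.2)).foldl max 0
  let gainL := (triples.filter (fun p => p.1.1 = 'C')).foldl (fun a p => a + p.2) 0
  let gainT := (triples.filter (fun p => p.1.1 = 'C')).foldl (fun a p => a + p.1.2) 0
  base + max (max gainC gainL) gainT

-- ===== PRECONDITION & SPEC =====
def Spec_numOfSubsequences (s : String) (out : Int) : Prop := out = numOfSubsequences_alt s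
instance (s : String) (out : Int) : Decidable (Spec_numOfSubsequences s out) := by unfold Spec_numOfSubsequences; infer_instance

-- ===== CLAIM (what is proved, stated in full; the proofs are below) =====
def Claim_equal_numOfSubsequences : Prop := ∀ (s : String), Dom_numOfSubsequences s → Spec_numOfSubsequences s (numOfSubsequences s)

-- ===== LEMMAS AND PROOFS =====

-- number of 'T' in a list, as an Int
def pvCT (cs : List Char) : Int := (cs.count 'T' : Int)

lemma pvCT_cons (c : Char) (cs : List Char) :
    pvCT (c :: cs) = (if c = 'T' then 1 else 0) + pvCT cs := by
  by_cases h : c = 'T' <;> simp [pvCT, List.count_cons, h] <;> push_cast <;> ring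

lemma pvCT_reverse (cs : List Char) : pvCT cs.reverse = pvCT cs := by
  simp [pvCT]

-- canonical recursive characterisations shared by both ports
def pvBaseF : List Char → Int → Int
  | [], _ => 0
  | c :: cs, l => (if c = 'C' then l * pvCT cs else 0) + pvBaseF cs (if c = 'L' then l + 1 else l)

def pvLaF : List Char → Int
  | [] => 0
  | c :: cs => (if c = 'C' then pvCT cs else 0) + pvLaF cs

def pvTaF : List Char → Int → Int
  | [], _ => 0
  | c :: cs, l => (if c = 'C' then l else 0) + pvTaF cs (if c = 'L' then l + 1 else l)

def pvBestF : List Char → Int → Int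
  | [], _ => 0
  | c :: cs, l =>
    max ((if c = 'L' then l + 1 else l) * pvCT cs) (pvBestF cs (if c = 'L' then l + 1 else l))

def pvCL (cs : List Char) : Int := (cs.count 'L' : Int)

-- A's loop, fully characterised
lemma foldA_eq (cs : List Char) : ∀ (ret l la ta best : Int), 0 ≤ best →
    cs.foldl numOfSubsequencesStep (ret, pvCT cs, l, la, ta, best)
      = (ret + pvBaseF cs l, 0, l + pvCL cs, la + pvLaF cs, ta + pvTaF cs l,
         max best (pvBestF cs l)) := by
  induction cs with
  | nil =>
    intro ret l la ta best hb
    simp [pvBaseF, pvLaF, pvTaF, pvBestF, pvCT, pvCL, max_eq_left hb]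
  | cons c cs ih =>
    intro ret l la ta best hb
    have hstep : numOfSubsequencesStep (ret, pvCT (c :: cs), l, la, ta, best) c
        = (ret + (if c = 'C' then l * pvCT cs else 0),
           pvCT cs,
           (if c = 'L' then l + 1 else l),
           la + (if c = 'C' then pvCT cs else 0),
           ta + (if c = 'C' then l else 0),
           max best ((if c = 'L' then l + 1 else l) * pvCT cs)) := by
      simp only [numOfSubsequencesStep, pvCT_cons c cs]
      by_cases hL : c = 'L' <;> by_cases hT : c = 'T' <;> by_cases hC : c = 'C' <;>
        simp_all <;> ring_nf
    rw [List.foldl_cons, hstep,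
        ih _ _ _ _ _ (le_trans hb (le_max_left _ _))]
    have hcl : pvCL (c :: cs) = (if c = 'L' then 1 else 0) + pvCL cs := by
      by_cases h : c = 'L' <;> simp [pvCL, List.count_cons, h] <;> push_cast <;> ring
    simp only [pvBaseF, pvLaF, pvTaF, pvBestF, hcl, Prod.mk.injEq, max_assoc]
    refine ⟨by ring, by trivial, by split_ifs <;> ring, by ring, by ring, by trivial⟩

-- bridge: PySem's substring count of "T" is the character count of 'T'
lemma countgo_T (cs : List Char) : ∀ (fuel acc : Nat), cs.length ≤ fuel →
    PySem.Chars.count.go ['T'] fuel cs acc = acc + cs.count 'T' := by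
  induction cs with
  | nil => intro fuel acc h; cases fuel <;> simp [PySem.Chars.count.go]
  | cons c cs ih =>
    intro fuel acc h
    cases fuel with
    | zero => simp at h
    | succ n =>
      simp only [PySem.Chars.count.go]
      by_cases hc : c = 'T'
      · subst hc
        simp [List.isPrefixOf, ih n (acc + 1) (by simp at h; omega), List.count_cons]
        omega
      · have hp : List.isPrefixOf ['T'] (c :: cs) = false := by
          simp [List.isPrefixOf]
          exact fun h' => absurd h'.symm hc
        rw [hp]
        rw [if_neg (by simp)]
        rw [ih n acc (by simp at h; omega)]
        simp [List.count_cons]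
        exact fun h' => absurd h' hc

lemma strCount_T (s : String) : (PySem.Str.count s "T" : Int) = pvCT s.toList := by
  have h1 : PySem.Str.count s "T" = PySem.Chars.count s.toList ['T'] := by
    simpa using PySem.Str.count_eq s "T"
  rw [h1]
  simp only [PySem.Chars.count]
  norm_num
  rw [show s.length = s.toList.length by simp]
  rw [countgo_T s.toList s.toList.length 0 le_rfl]
  simp [pvCT]

-- closed form of A
lemma A_closed (s : String) :
    numOfSubsequences s
      = pvBaseF s.toList 0 + max (max (max 0 (pvBestF s.toList 0)) (pvLaF s.toList))
          (pvTaF s.toList 0) := by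
  unfold numOfSubsequences
  rw [show ((PySem.Str.count s "T" : Int)) = pvCT s.toList from strCount_T s,
      foldA_eq s.toList 0 0 0 0 0 le_rfl]
  simp

-- B-side: the suffix-count list decomposes cons-wise
lemma pvTsAux_append (l : List Char) : ∀ (a : Int) (c : Char),
    pvTsAux a (l ++ [c]) = pvTsAux a l ++ [a + pvCT l] := by
  induction l with
  | nil => intro a c; simp [pvTsAux, pvCT]
  | cons d l ih =>
    intro a c
    simp only [List.cons_append, pvTsAux, ih, pvCT_cons, List.cons.injEq, true_and]
    split_ifs with h <;> simp <;> ring_nf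

lemma tsList_cons (c : Char) (cs : List Char) :
    (pvTsAux 0 ((c :: cs).reverse)).reverse
      = pvCT cs :: (pvTsAux 0 cs.reverse).reverse := by
  rw [List.reverse_cons, pvTsAux_append]
  simp [pvCT_reverse]

-- the triples list decomposes cons-wise
lemma triples_cons (c : Char) (cs : List Char) (acc : Int) :
    (((c :: cs).zip (pvLpAux acc (c :: cs))).zip ((pvTsAux 0 ((c :: cs).reverse)).reverse))
      = ((c, acc), pvCT cs)
          :: ((cs.zip (pvLpAux (if c = 'L' then acc + 1 else acc) cs)).zip
                ((pvTsAux 0 cs.reverse).reverse)) := by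
  rw [tsList_cons]
  simp [pvLpAux]

-- accumulator-shift lemmas for B's folds
lemma foldl_max_shift (l : List Int) : ∀ (a b : Int),
    l.foldl max (max a b) = max a (l.foldl max b) := by
  induction l with
  | nil => intro a b; rfl
  | cons x l ih =>
    intro a b
    simp only [List.foldl_cons, max_assoc, ih]

lemma foldl_add_shift {α : Type} (g : α → Int) (l : List α) : ∀ (a : Int),
    l.foldl (fun x p => x + g p) a = a + l.foldl (fun x p => x + g p) 0 := by
  induction l with
  | nil => intro a; simp
  | cons x l ih =>
    intro a
    simp only [List.foldl_cons]
    rw [ih (a + g x), ih (0 + g x)]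
    ring

-- B's passes over the triples equal the canonical characterisations
lemma B_base (cs : List Char) : ∀ (acc : Int),
    (((cs.zip (pvLpAux acc cs)).zip ((pvTsAux 0 cs.reverse).reverse)).filter
        (fun p => p.1.1 = 'C')).foldl (fun a p => a + p.1.2 * p.2) 0
      = pvBaseF cs acc := by
  induction cs with
  | nil => intro acc; rfl
  | cons c cs ih =>
    intro acc
    rw [triples_cons]
    by_cases hC : c = 'C'
    · subst hC
      simp only [List.filter_cons, decide_true, if_true, List.foldl_cons, pvBaseF]
      rw [foldl_add_shift (fun p : (Char × Int) × Int => p.1.2 * p.2), ih]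
      simp
    · simp only [List.filter_cons, pvBaseF]
      simp [hC, ih]

lemma B_gainL (cs : List Char) : ∀ (acc : Int),
    (((cs.zip (pvLpAux acc cs)).zip ((pvTsAux 0 cs.reverse).reverse)).filter
        (fun p => p.1.1 = 'C')).foldl (fun a p => a + p.2) 0
      = pvLaF cs := by
  induction cs with
  | nil => intro acc; rfl
  | cons c cs ih =>
    intro acc
    rw [triples_cons]
    by_cases hC : c = 'C'
    · subst hC
      simp only [List.filter_cons, decide_true, if_true, List.foldl_cons, pvLaF]
      rw [foldl_add_shift (fun p : (Char × Int) × Int => p.2), ih]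
      simp
    · simp only [List.filter_cons, pvLaF]
      simp [hC, ih]

lemma B_gainT (cs : List Char) : ∀ (acc : Int),
    (((cs.zip (pvLpAux acc cs)).zip ((pvTsAux 0 cs.reverse).reverse)).filter
        (fun p => p.1.1 = 'C')).foldl (fun a p => a + p.1.2) 0
      = pvTaF cs acc := by
  induction cs with
  | nil => intro acc; rfl
  | cons c cs ih =>
    intro acc
    rw [triples_cons]
    by_cases hC : c = 'C'
    · subst hC
      simp only [List.filter_cons, decide_true, if_true, List.foldl_cons, pvTaF]
      rw [foldl_add_shift (fun p : (Char × Int) × Int => p.1.2), ih]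
      simp
    · simp only [List.filter_cons, pvTaF]
      simp [hC, ih]

lemma B_gainC (cs : List Char) : ∀ (acc : Int),
    (((cs.zip (pvLpAux acc cs)).zip ((pvTsAux 0 cs.reverse).reverse)).map
        (fun p => (p.1.2 + (if p.1.1 = 'L' then 1 else 0)) * p.2)).foldl max 0
      = max 0 (pvBestF cs acc) := by
  induction cs with
  | nil => intro acc; simp [pvBestF]
  | cons c cs ih =>
    intro acc
    rw [triples_cons]
    simp only [List.map_cons, List.foldl_cons, pvBestF]
    rw [max_comm (0 : Int), foldl_max_shift, ih]
    by_cases hL : c = 'L' <;> simp [hL] <;> rw [max_left_comm]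

-- closed form of B
lemma B_closed (s : String) :
    numOfSubsequences_alt s
      = pvBaseF s.toList 0 + max (max (max 0 (pvBestF s.toList 0)) (pvLaF s.toList))
          (pvTaF s.toList 0) := by
  unfold numOfSubsequences_alt
  simp only [B_base s.toList 0, B_gainL s.toList 0, B_gainT s.toList 0, B_gainC s.toList 0]

-- ===== VERDICT (by name: the statement is the Claim_ definition above) =====
theorem numOfSubsequences_spec : Claim_equal_numOfSubsequences := by
  intro s _
  unfold Spec_numOfSubsequences
  rw [A_closed, B_closed]
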